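-- pv_equiv track=rewrite | github.com/bkmashiro/branchfs | src/branchfs/branch.py | effective_tree
-- ===== SOURCE A (Python) =====
-- from typing import Any, Dict, List, Optional
--
-- DELETED_SENTINEL = "__deleted__"
--
-- def effective_tree(
--     snapshot_tree: Dict[str, str],
--     branch_modified: Dict[str, str],
-- ) -> Dict[str, str]:
--     """Merge snapshot tree with branch modifications.
--
--     Returns the complete file tree as the workspace would see it.
--     """
--     tree = dict(snapshot_tree)
--     for path, value in branch_modified.items():
--         if value == DELETED_SENTINEL:
--             tree.pop(path, None)
--         else:
--             tree[path] = value
--     return tree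
-- ===== SOURCE B (Python) =====
-- DELETED_SENTINEL = "__deleted__"
--
-- def effective_tree(snapshot_tree, branch_modified):
--     """Merge snapshot tree with branch modifications.
--
--     Append-only construction driven by lookups: walk the snapshot once,
--     consulting the branch for each path (skip deleted, take the updated
--     value, otherwise keep the snapshot value), then append the branch's
--     genuinely new non-deleted paths.  No merged dict is ever mutated,
--     shrunk or overwritten.
--     """
--     kept = []
--     for path, val in snapshot_tree.items():
--         if path in branch_modified:
--             bv = branch_modified[path]
--             if bv != DELETED_SENTINEL:
--                 kept.append((path, bv))
--         else:
--             kept.append((path, val))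
--     new = [(path, v) for path, v in branch_modified.items()
--            if v != DELETED_SENTINEL and path not in snapshot_tree]
--     return dict(kept + new)
-- ===== Notes on version B (the rewrite author's own statement) =====
-- stated objective: alternative
-- what changed: A copies the snapshot dict and mutates it in a branch-major overlay pass (pop on the sentinel, assign otherwise); B never mutates or shrinks a merged dict: it builds the result append-only, snapshot-major, looking each snapshot path up in the branch (skip deleted, take updated value, keep otherwise) and then appending the branch's new non-deleted paths.
import Mathlib
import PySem

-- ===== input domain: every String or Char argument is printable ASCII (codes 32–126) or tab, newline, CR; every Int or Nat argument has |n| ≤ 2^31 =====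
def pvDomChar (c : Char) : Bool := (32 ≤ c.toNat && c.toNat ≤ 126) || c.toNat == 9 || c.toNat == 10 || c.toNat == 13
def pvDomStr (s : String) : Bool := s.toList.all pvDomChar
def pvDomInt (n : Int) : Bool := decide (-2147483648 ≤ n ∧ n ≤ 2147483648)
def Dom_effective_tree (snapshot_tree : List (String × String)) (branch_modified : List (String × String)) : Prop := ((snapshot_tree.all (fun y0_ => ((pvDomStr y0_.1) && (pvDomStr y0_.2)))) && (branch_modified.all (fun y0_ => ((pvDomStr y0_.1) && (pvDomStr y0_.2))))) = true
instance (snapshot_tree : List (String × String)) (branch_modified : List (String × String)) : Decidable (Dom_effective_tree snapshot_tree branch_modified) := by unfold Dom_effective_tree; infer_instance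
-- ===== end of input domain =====

-- B replaces A's copy-and-mutate overlay pass (pop/overwrite on a merged dict) by an
-- append-only, lookup-driven construction: one walk over the snapshot consulting the
-- branch, then the branch's new non-deleted paths appended; objective: alternative.

-- ===== PORT A =====
-- literal port of A: copy the snapshot dict, then one pass over the branch items,
-- popping deleted paths and overwriting/appending the rest.
def effective_tree (snapshot_tree : List (String × String)) (branch_modified : List (String × String)) : List (String × String) :=
  let tree := PySem.Dict.ofList snapshot_tree
  ((PySem.Dict.ofList branch_modified).items.foldl
    (fun t pv => if pv.2 == "__deleted__" then t.erase pv.1 else t.insert pv.1 pv.2)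
    tree).items

-- ===== PORT B =====
-- literal port of Source B: append-only walk over the snapshot consulting the branch
-- ('path in bm' + 'bm[path]' is ported as one get? match — exact, since
-- contains ↔ get?.isSome), then the comprehension of new non-deleted branch paths,
-- then dict(kept + new).
def effective_tree_alt (snapshot_tree : List (String × String)) (branch_modified : List (String × String)) : List (String × String) :=
  let sd := PySem.Dict.ofList snapshot_tree
  let bd := PySem.Dict.ofList branch_modified
  let kept := sd.items.foldl
    (fun r pv =>
      match bd.get? pv.1 with
      | some bv => if bv == "__deleted__" then r else r ++ [(pv.1, bv)]
      | none => r ++ [pv]) []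
  let new := bd.items.filter (fun pv => !(pv.2 == "__deleted__") && !(sd.contains pv.1))
  (PySem.Dict.ofList (kept ++ new)).items

-- ===== PRECONDITION & SPEC =====
def Spec_effective_tree (snapshot_tree : List (String × String)) (branch_modified : List (String × String)) (out : List (String × String)) : Prop := out = effective_tree_alt snapshot_tree branch_modified
instance (snapshot_tree : List (String × String)) (branch_modified : List (String × String)) (out : List (String × String)) : Decidable (Spec_effective_tree snapshot_tree branch_modified out) := by unfold Spec_effective_tree; infer_instance

-- ===== CLAIM (what is proved, stated in full; the proofs are below) =====
def Claim_equal_effective_tree : Prop := ∀ (snapshot_tree : List (String × String)) (branch_modified : List (String × String)), Dom_effective_tree snapshot_tree branch_modified → Spec_effective_tree snapshot_tree branch_modified (effective_tree snapshot_tree branch_modified)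

-- ===== LEMMAS AND PROOFS =====

-- how B treats one snapshot entry, as a 0/1-element list
def gLook (bd : PySem.Dict String String) (pv : String × String) : List (String × String) :=
  match bd.get? pv.1 with
  | some bv => if bv == "__deleted__" then [] else [(pv.1, bv)]
  | none => [pv]

-- B's kept-loop is acc ++ flatMap of gLook
theorem foldl_gLook (bd : PySem.Dict String String) (m : List (String × String))
    (acc : List (String × String)) :
    m.foldl (fun r pv =>
      match bd.get? pv.1 with
      | some bv => if bv == "__deleted__" then r else r ++ [(pv.1, bv)]
      | none => r ++ [pv]) acc = acc ++ m.flatMap (gLook bd) := by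
  induction m generalizing acc with
  | nil => simp
  | cons a m ih =>
    simp only [List.foldl_cons, List.flatMap_cons]
    cases hg : bd.get? a.1 with
    | none => rw [ih]; simp [gLook, hg]
    | some bv =>
      by_cases hb : (bv == "__deleted__") = true
      · simp only [hb, if_true]; rw [ih]; simp [gLook, hg, hb]
      · simp only [hb]; rw [ih]; simp [gLook, hg, hb]

theorem flatMap_congr_mem {α β : Type} (m : List α) (h h' : α → List β)
    (H : ∀ x ∈ m, h x = h' x) : m.flatMap h = m.flatMap h' := by
  induction m with
  | nil => rfl
  | cons a m ih =>
    simp only [List.flatMap_cons]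
    rw [H a (by simp), ih (fun x hx => H x (by simp [hx]))]

theorem flatMap_eq_filter_flatMap {α β : Type} (m : List α) (q : α → Bool)
    (h h' : α → List β) (H1 : ∀ x, q x = true → h' x = h x)
    (H2 : ∀ x, q x = false → h' x = []) :
    m.flatMap h' = (m.filter q).flatMap h := by
  induction m with
  | nil => rfl
  | cons a m ih =>
    simp only [List.flatMap_cons, List.filter_cons]
    by_cases hq : q a = true
    · rw [hq, H1 a hq, ih]; simp
    · rw [Bool.not_eq_true] at hq; rw [hq, H2 a hq, ih]; simp

theorem items_erase (d : PySem.Dict String String) (k : String) :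
    (d.erase k).items = d.items.filter (fun p => !(p.1 == k)) := by
  obtain ⟨m⟩ := d
  simp [PySem.Dict.erase]

theorem contains_erase_ne (d : PySem.Dict String String) (k q : String) (h : q ≠ k) :
    (d.erase k).contains q = d.contains q := by
  obtain ⟨m⟩ := d
  simp only [PySem.Dict.erase, PySem.Dict.contains, List.any_filter]
  congr 1
  funext a
  by_cases hc : a.1 = q
  · subst hc; simp [h]
  · simp [hc]

theorem get?_mk_none (L : List (String × String)) (k : String)
    (h : k ∉ L.map Prod.fst) : (PySem.Dict.mk L).get? k = none := by
  rw [PySem.Dict.get?_eq_none_iff_not_mem_keys]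
  simpa using h

theorem gLook_cons (k v : String) (L : List (String × String)) (pv : String × String) :
    gLook (PySem.Dict.mk ((k, v) :: L)) pv =
      if k == pv.1 then (if v == "__deleted__" then [] else [(pv.1, v)])
      else gLook (PySem.Dict.mk L) pv := by
  simp only [gLook, PySem.Dict.get?_mk_cons]
  by_cases h : (k == pv.1) = true <;> simp [h]

-- A's overlay pass over nodup-keyed branch items, characterised snapshot-major
theorem main_lemma (L : List (String × String)) (d : PySem.Dict String String)
    (hnd : (L.map Prod.fst).Nodup) :
    (L.foldl (fun t pv => if pv.2 == "__deleted__" then t.erase pv.1 else t.insert pv.1 pv.2) d).items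
      = d.items.flatMap (gLook (PySem.Dict.mk L))
        ++ L.filter (fun pv => !(pv.2 == "__deleted__") && !(d.contains pv.1)) := by
  induction L generalizing d with
  | nil =>
    simp only [List.foldl_nil, List.filter_nil, List.append_nil]
    rw [flatMap_congr_mem d.items (gLook (PySem.Dict.mk [])) (fun pv => [pv])
      (fun pv _ => by simp [gLook, get?_mk_none [] pv.1 (by simp)])]
    simp
  | cons a L ih =>
    obtain ⟨ak, av⟩ := a
    have ha : ak ∉ L.map Prod.fst := (List.nodup_cons.mp (by simpa using hnd)).1
    have hnd2 : (L.map Prod.fst).Nodup := (List.nodup_cons.mp (by simpa using hnd)).2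
    have kNone : (PySem.Dict.mk L).get? ak = none := get?_mk_none L ak ha
    have hLne : ∀ pv ∈ L, pv.1 ≠ ak := by
      intro pv hpv he
      exact ha (he ▸ List.mem_map_of_mem hpv)
    simp only [List.foldl_cons, List.filter_cons]
    by_cases hdel : (av == "__deleted__") = true
    · -- deletion step
      simp only [hdel, if_true, Bool.not_true, Bool.false_and, Bool.false_eq_true, if_false]
      rw [ih (d.erase ak) hnd2, items_erase]
      congr 1
      · rw [flatMap_eq_filter_flatMap d.items (fun p => !(p.1 == ak))
          (gLook (PySem.Dict.mk L)) (gLook (PySem.Dict.mk ((ak, av) :: L)))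
          (fun x hx => by
            have hne : ¬ (x.1 = ak) := by simpa using hx
            have hxa : (ak == x.1) = false := beq_eq_false_iff_ne.mpr (fun h => hne h.symm)
            rw [gLook_cons, hxa]; simp)
          (fun x hx => by
            have hxe : x.1 = ak := by simpa using hx
            have hxa : (ak == x.1) = true := by simp [hxe]
            rw [gLook_cons, hxa]; simp [hdel])]
      · apply List.filter_congr
        intro pv hpv
        rw [contains_erase_ne d ak pv.1 (hLne pv hpv)]
    · -- insert step
      simp only [hdel, Bool.false_eq_true, if_false, Bool.not_false, Bool.true_and]
      rw [ih (d.insert ak av) hnd2]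
      have hfiltins : List.filter (fun pv => !(pv.2 == "__deleted__") && !((d.insert ak av).contains pv.1)) L
          = List.filter (fun pv => !(pv.2 == "__deleted__") && !(d.contains pv.1)) L := by
        apply List.filter_congr
        intro pv hpv
        rw [PySem.Dict.contains_insert]
        have : (pv.1 == ak) = false := by simpa using hLne pv hpv
        simp [this]
      by_cases hc : d.contains ak = true
      · simp only [hc, Bool.not_true, Bool.false_eq_true, if_false]
        rw [hfiltins]
        simp only [PySem.Dict.items_insert, hc, if_true]
        congr 1
        rw [List.flatMap_map]
        apply flatMap_congr_mem
        intro p _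
        by_cases hp : p.1 = ak
        · have h1 : (p.1 == ak) = true := by simpa using hp
          have h2 : (ak == p.1) = true := by simpa using hp.symm
          simp only [h1, if_true]
          rw [gLook_cons, h2]
          simp [gLook, kNone, hdel, hp]
        · have h1 : (p.1 == ak) = false := by simpa using hp
          have h2 : (ak == p.1) = false := by simpa using (Ne.symm hp)
          simp only [h1, Bool.false_eq_true, if_false]
          rw [gLook_cons, h2]
          simp
      · have hc' : d.contains ak = false := by simpa using hc
        simp only [hc', Bool.not_false, if_true]
        rw [hfiltins]
        simp only [PySem.Dict.items_insert, hc', Bool.false_eq_true, if_false]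
        have hdne : ∀ p ∈ d.items, p.1 ≠ ak := by
          intro p hp he
          have : d.contains ak = true := by
            rw [PySem.Dict.contains_iff_mem_keys]
            exact he ▸ PySem.Dict.mem_keys_of_mem_items d hp
          simp [hc'] at this
        rw [List.flatMap_append]
        have h2 : [((ak, av) : String × String)].flatMap (gLook (PySem.Dict.mk L)) = [(ak, av)] := by
          simp [gLook, kNone]
        rw [h2]
        rw [flatMap_congr_mem d.items (gLook (PySem.Dict.mk L)) (gLook (PySem.Dict.mk ((ak, av) :: L)))
          (fun p hp => by
            have hxa : (ak == p.1) = false := by simpa using (Ne.symm (hdne p hp))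
            rw [gLook_cons, hxa]; simp)]
        simp

theorem items_ofList_nodup (l : List (String × String)) (hnd : (l.map Prod.fst).Nodup) :
    (PySem.Dict.ofList l).items = l := by
  have := PySem.Dict.items_foldl_insert_fresh l Prod.fst Prod.snd PySem.Dict.empty
    (fun a _ => by simp [PySem.Dict.contains, PySem.Dict.empty]) hnd
  simpa [PySem.Dict.ofList] using this

-- each gLook result carries the key of its argument (and has at most one entry)
theorem keys_gLook (bd : PySem.Dict String String) (a : String × String) :
    (gLook bd a).map Prod.fst = [] ∨ (gLook bd a).map Prod.fst = [a.1] := by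
  unfold gLook
  cases bd.get? a.1 with
  | none => right; simp
  | some bv =>
    by_cases h : (bv == "__deleted__") = true
    · left; simp [h]
    · right; simp [h]

theorem keys_flatMap_sublist (bd : PySem.Dict String String) (m : List (String × String)) :
    ((m.flatMap (gLook bd)).map Prod.fst).Sublist (m.map Prod.fst) := by
  induction m with
  | nil => simp
  | cons a m ih =>
    simp only [List.flatMap_cons, List.map_append, List.map_cons]
    rcases keys_gLook bd a with h | h
    · rw [h, List.nil_append]
      exact ih.cons a.1
    · rw [h, List.singleton_append]
      exact ih.cons₂ a.1

-- ===== VERDICT (by name: the statement is the Claim_ definition above) =====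
theorem effective_tree_spec : Claim_equal_effective_tree := by
  intro s b _
  unfold Spec_effective_tree effective_tree effective_tree_alt
  dsimp only
  have hndb : (((PySem.Dict.ofList b).items).map (Prod.fst (α := String) (β := String))).Nodup := by
    simpa [PySem.Dict.keys] using PySem.Dict.nodup_keys_ofList (ν := String) b
  have hnds : (((PySem.Dict.ofList s).items).map (Prod.fst (α := String) (β := String))).Nodup := by
    simpa [PySem.Dict.keys] using PySem.Dict.nodup_keys_ofList (ν := String) s
  have heta : PySem.Dict.mk (PySem.Dict.ofList b).items = PySem.Dict.ofList b := rfl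
  have hkept := keys_flatMap_sublist (PySem.Dict.ofList b) (PySem.Dict.ofList s).items
  have hkeys : ((((PySem.Dict.ofList s).items.flatMap (gLook (PySem.Dict.ofList b)))
      ++ (PySem.Dict.ofList b).items.filter
          (fun pv => !(pv.2 == "__deleted__") && !((PySem.Dict.ofList s).contains pv.1))).map
        Prod.fst).Nodup := by
    rw [List.map_append, List.nodup_append]
    refine ⟨hkept.nodup hnds, (List.filter_sublist.map Prod.fst).nodup hndb, ?_⟩
    intro x hx1 y hy hxy
    subst hxy
    have hxs : x ∈ (PySem.Dict.ofList s).items.map Prod.fst := hkept.subset hx1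
    obtain ⟨pv, hpv, rfl⟩ := List.mem_map.mp hy
    have hpred := List.of_mem_filter hpv
    have hnc : (PySem.Dict.ofList s).contains pv.1 = false := by
      rcases Bool.and_eq_true_iff.mp hpred with ⟨_, h2⟩
      simpa using h2
    have : (PySem.Dict.ofList s).contains pv.1 = true := by
      rw [PySem.Dict.contains_iff_mem_keys]
      simpa [PySem.Dict.keys] using hxs
    simp [hnc] at this
  rw [main_lemma _ _ hndb, heta, foldl_gLook]
  simp only [List.nil_append]
  rw [items_ofList_nodup _ hkeys]
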